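-- pv_equiv track=rewrite | github.com/DavidCagua/whats-app-bot | app/utils/encryption.py | is_encrypted
-- ===== SOURCE A (Python) =====
-- IV_LENGTH = 16
--
-- AUTH_TAG_LENGTH = 16
--
-- def is_encrypted(text: str) -> bool:
--     """
--     Check if text matches the encrypted format (hex:hex:hex).
--
--     Args:
--         text: String to check
--
--     Returns:
--         True if text appears to be encrypted
--     """
--     parts = text.split(":")
--     if len(parts) != 3:
--         return False
--
--     # Check if parts are valid hex and have correct lengths
--     try:
--         iv_hex = parts[0]
--         tag_hex = parts[1]
--         encrypted_hex = parts[2]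
--
--         # Validate hex format
--         if not all(c in '0123456789abcdefABCDEF' for c in iv_hex):
--             return False
--         if not all(c in '0123456789abcdefABCDEF' for c in tag_hex):
--             return False
--         if not all(c in '0123456789abcdefABCDEF' for c in encrypted_hex):
--             return False
--
--         # Validate lengths
--         if len(iv_hex) != IV_LENGTH * 2:
--             return False
--         if len(tag_hex) != AUTH_TAG_LENGTH * 2:
--             return False
--
--         return True
--
--     except Exception:
--         return False
-- ===== SOURCE B (Python) =====
-- IV_LENGTH = 16
--
-- AUTH_TAG_LENGTH = 16
--
-- def is_encrypted(text: str) -> bool: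
--     # Single left-to-right scan: count the length of each run of hex digits
--     # between colon separators; reject immediately on any other character.
--     runs = [0]
--     for c in text:
--         if c == ':':
--             runs.append(0)
--         elif c in '0123456789abcdefABCDEF':
--             runs[-1] += 1
--         else:
--             return False
--     return len(runs) == 3 and runs[0] == IV_LENGTH * 2 and runs[1] == AUTH_TAG_LENGTH * 2
-- ===== Notes on version B (the rewrite author's own statement) =====
-- stated objective: alternative
-- what changed: Replaced split-into-parts plus three full-string hex checks and length checks by a single left-to-right scan that counts runs of hex digits between colon separators and rejects on the first bad character.
import Mathlib
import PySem

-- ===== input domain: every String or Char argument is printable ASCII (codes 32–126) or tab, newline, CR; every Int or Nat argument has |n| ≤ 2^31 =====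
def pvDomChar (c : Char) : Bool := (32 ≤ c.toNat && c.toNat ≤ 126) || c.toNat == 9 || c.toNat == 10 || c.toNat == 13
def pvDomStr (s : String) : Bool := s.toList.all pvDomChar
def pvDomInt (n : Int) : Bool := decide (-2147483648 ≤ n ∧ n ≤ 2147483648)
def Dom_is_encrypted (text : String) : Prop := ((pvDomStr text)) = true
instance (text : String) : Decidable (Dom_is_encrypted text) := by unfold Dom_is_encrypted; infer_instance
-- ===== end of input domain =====

-- B replaces split + per-part hex/length checks by one counting scan over the characters, colon-separated runs tallied as it goes (objective: alternative, same cost).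

-- ===== PORT A =====
def pvHexChars : List Char := "0123456789abcdefABCDEF".toList

def is_encrypted (text : String) : Bool :=
  let parts := PySem.Chars.splitOn text.toList [':']
  if parts.length ≠ 3 then false
  else
    let iv_hex := parts.getD 0 []
    let tag_hex := parts.getD 1 []
    let encrypted_hex := parts.getD 2 []
    if ¬ (iv_hex.all fun c => pvHexChars.contains c) then false
    else if ¬ (tag_hex.all fun c => pvHexChars.contains c) then false
    else if ¬ (encrypted_hex.all fun c => pvHexChars.contains c) then false
    else if iv_hex.length ≠ 16 * 2 then false
    else if tag_hex.length ≠ 16 * 2 then false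
    else true

-- ===== PORT B =====
-- Source B's loop: `runs` kept as (current run, earlier runs reversed); `none` = early `return False`.
def pvScan : List Char → Nat → List Nat → Option (List Nat)
  | [], cur, done => some ((cur :: done).reverse)
  | c :: cs, cur, done =>
    if c = ':' then pvScan cs 0 (cur :: done)
    else if pvHexChars.contains c then pvScan cs (cur + 1) done
    else none

def is_encrypted_alt (text : String) : Bool :=
  match pvScan text.toList 0 [] with
  | none => false
  | some runs => runs.length == 3 && runs.getD 0 0 == 16 * 2 && runs.getD 1 0 == 16 * 2

-- ===== PRECONDITION & SPEC =====
def Spec_is_encrypted (text : String) (out : Bool) : Prop := out = is_encrypted_alt text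
instance (text : String) (out : Bool) : Decidable (Spec_is_encrypted text out) := by unfold Spec_is_encrypted; infer_instance

-- ===== CLAIM (what is proved, stated in full; the proofs are below) =====
def Claim_equal_is_encrypted : Prop := ∀ (text : String), Dom_is_encrypted text → Spec_is_encrypted text (is_encrypted text)

-- ===== LEMMAS AND PROOFS =====

-- natural single-char split recursion, used to characterise both ports
def pvSplit : List Char → List Char → List (List Char)
  | [], pre => [pre.reverse]
  | c :: cs, pre => if c = ':' then pre.reverse :: pvSplit cs [] else pvSplit cs (c :: pre)

lemma pvGo_spec : ∀ (fuel : Nat) (l cur : List Char) (acc : List (List Char)),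
    l.length < fuel →
    PySem.Chars.splitOn.go [':'] fuel l cur acc = acc.reverse ++ pvSplit l cur := by
  intro fuel
  induction fuel with
  | zero => intro l cur acc h; exact absurd h (Nat.not_lt_zero _)
  | succ n ih =>
    intro l cur acc h
    cases l with
    | nil => simp [PySem.Chars.splitOn.go, pvSplit]
    | cons c rest =>
      have h' : rest.length < n := by simpa using Nat.lt_of_succ_lt_succ (by simpa using h)
      by_cases hc : c = ':'
      · subst hc
        have e : PySem.Chars.splitOn.go [':'] (n + 1) (':' :: rest) cur acc
            = PySem.Chars.splitOn.go [':'] n rest [] (cur.reverse :: acc) := by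
          simp [PySem.Chars.splitOn.go, List.isPrefixOf]
        rw [e, ih _ _ _ h']
        simp [pvSplit]
      · have hc' : ¬(':' = c) := fun h => hc h.symm
        have e : PySem.Chars.splitOn.go [':'] (n + 1) (c :: rest) cur acc
            = PySem.Chars.splitOn.go [':'] n rest (c :: cur) acc := by
          simp [PySem.Chars.splitOn.go, List.isPrefixOf, hc']
        rw [e, ih _ _ _ h']
        simp [pvSplit, hc]

lemma pvSplitOn_eq (cs : List Char) : PySem.Chars.splitOn cs [':'] = pvSplit cs [] := by
  unfold PySem.Chars.splitOn
  rw [pvGo_spec _ _ _ _ (Nat.lt_succ_self _)]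
  simp

def pvLSplit : List Char → Nat → List Nat
  | [], cur => [cur]
  | c :: cs, cur => if c = ':' then cur :: pvLSplit cs 0 else pvLSplit cs (cur + 1)

lemma pvSplit_len (cs : List Char) : ∀ pre, (pvSplit cs pre).map List.length = pvLSplit cs pre.length := by
  induction cs with
  | nil => intro pre; simp [pvSplit, pvLSplit]
  | cons c cs ih => intro pre; by_cases hc : c = ':' <;> simp [pvSplit, pvLSplit, hc, ih]

def pvOk (c : Char) : Bool := (c = ':') || pvHexChars.contains c

lemma pvSplit_allHex (cs : List Char) : ∀ pre,
    ((pvSplit cs pre).all fun p => p.all fun c => pvHexChars.contains c)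
      = ((pre.all fun c => pvHexChars.contains c) && cs.all pvOk) := by
  induction cs with
  | nil => intro pre; simp [pvSplit]
  | cons c cs ih =>
    intro pre
    by_cases hc : c = ':'
    · have e : pvSplit (c :: cs) pre = pre.reverse :: pvSplit cs [] := by simp [pvSplit, hc]
      rw [e, List.all_cons, ih]
      simp [pvOk, hc, Bool.and_comm]
    · have e : pvSplit (c :: cs) pre = pvSplit cs (c :: pre) := by simp [pvSplit, hc]
      rw [e, ih]
      simp [pvOk, hc, Bool.and_assoc, Bool.and_comm]

lemma pvScan_spec (cs : List Char) : ∀ cur done,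
    pvScan cs cur done = if cs.all pvOk then some (done.reverse ++ pvLSplit cs cur) else none := by
  induction cs with
  | nil => intro cur done; simp [pvScan, pvLSplit]
  | cons c cs ih =>
    intro cur done
    by_cases hc : c = ':'
    · simp [pvScan, pvLSplit, hc, ih, pvOk]
    · by_cases hh : pvHexChars.contains c
      · have hh' : c ∈ pvHexChars := by simpa using hh
        simp [pvScan, pvLSplit, hc, hh', ih, pvOk]
      · have hh' : c ∉ pvHexChars := by simpa using hh
        simp [pvScan, hc, hh', pvOk]

-- ===== VERDICT (by name: the statement is the Claim_ definition above) =====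
theorem is_encrypted_spec : Claim_equal_is_encrypted := by
  intro text _
  unfold Spec_is_encrypted is_encrypted is_encrypted_alt
  rw [pvSplitOn_eq, pvScan_spec]
  have hmap := pvSplit_len text.toList []
  have hhex := pvSplit_allHex text.toList []
  simp only [List.length_nil, List.all_nil, Bool.true_and] at hmap hhex
  by_cases hall : text.toList.all pvOk = true
  · rw [if_pos hall]
    rw [hall] at hhex
    by_cases hl : (pvSplit text.toList []).length = 3
    · obtain ⟨p0, p1, p2, hP⟩ := List.length_eq_three.mp hl
      rw [hP] at hmap hhex
      simp only [List.map_cons, List.map_nil] at hmap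
      simp only [List.all_cons, List.all_nil, Bool.and_true] at hhex
      obtain ⟨h0, h1, h2⟩ := by simpa [Bool.and_eq_true] using hhex
      by_cases e0 : p0.length = 32 <;> by_cases e1 : p1.length = 32 <;>
        (simp [hP, ← hmap, e0, e1]; try exact ⟨h0, h1, h2⟩)
    · have hlen : (pvLSplit text.toList 0).length = (pvSplit text.toList []).length := by
        rw [← hmap]; simp
      simp [hl, hlen]
  · rw [if_neg hall]
    simp only [Bool.not_eq_true] at hall
    rw [hall] at hhex
    by_cases hl : (pvSplit text.toList []).length = 3
    · obtain ⟨p0, p1, p2, hP⟩ := List.length_eq_three.mp hl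
      rw [hP] at hhex
      simp only [List.all_cons, List.all_nil, Bool.and_true] at hhex
      simp [hP] at hhex ⊢
      intro a0 a1 a2 _
      obtain ⟨x, hx, hnx⟩ := hhex a0 a1
      exact fun _ => absurd (a2 x hx) hnx
    · simp [hl]
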